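-- pv_equiv track=rewrite | github.com/acrale/minetext | mytweetsentiment/textprocessor/EnglishProccess.py | removeName
-- ===== SOURCE A (Python) =====
-- def removeName(text):
--    i = 0
--    j = 1
--    words = text.split()
--    lim = len(words) - 1
--    while j <= lim:
--       if not words[i].isupper() and not words[i].islower():
--          if not words[j].isupper() and not words[j].islower():
--             words[i] = words[i].replace(words[i], "")
--             words[j] = words[j].replace(words[j], "")
--       i += 1
--       j += 1
--    words = ' '.join(words)
--    return words
-- ===== SOURCE B (Python) =====
-- def removeName(text):
--     words = text.split()
--     n = len(words)
--     mask = [not w.isupper() and not w.islower() for w in words]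
--     out = []
--     for k, w in enumerate(words):
--         if mask[k] and ((k > 0 and mask[k - 1]) or (k + 1 < n and mask[k + 1])):
--             out.append('')
--         else:
--             out.append(w)
--     return ' '.join(out)
-- ===== Notes on version B (the rewrite author's own statement) =====
-- stated objective: alternative
-- what changed: Replaced the mutating two-pointer adjacent-pair walk (which relies on a blanked word still classifying as name-like) with a precomputed classification mask and one neighbour-lookup pass that emits an empty string or the original word.
import Mathlib
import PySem

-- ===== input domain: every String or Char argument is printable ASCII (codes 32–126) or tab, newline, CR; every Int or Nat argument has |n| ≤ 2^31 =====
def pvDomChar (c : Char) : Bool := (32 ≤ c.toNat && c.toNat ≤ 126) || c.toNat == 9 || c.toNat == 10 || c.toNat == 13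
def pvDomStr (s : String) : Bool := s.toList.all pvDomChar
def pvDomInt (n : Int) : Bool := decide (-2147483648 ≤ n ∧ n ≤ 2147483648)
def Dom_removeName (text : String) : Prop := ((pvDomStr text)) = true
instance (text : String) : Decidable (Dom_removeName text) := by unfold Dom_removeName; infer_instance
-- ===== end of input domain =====

-- B replaces A's mutating two-pointer adjacent-pair walk by a precomputed classification
-- mask plus one neighbour-lookup pass (alternative decomposition, same cost).

-- Python str.isupper() on the ASCII domain: at least one letter, and every letter uppercase.
def pvStrIsupper (s : String) : Bool :=
  (s.toList.any fun c => PySem.Chars.isalpha c) &&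
  (s.toList.all fun c => !PySem.Chars.isalpha c || PySem.Chars.isupper c)

-- Python str.islower() on the ASCII domain: at least one letter, and every letter lowercase.
def pvStrIslower (s : String) : Bool :=
  (s.toList.any fun c => PySem.Chars.isalpha c) &&
  (s.toList.all fun c => !PySem.Chars.isalpha c || PySem.Chars.islower c)

-- 'not w.isupper() and not w.islower()' — the classification both Pythons apply.
def pvNamelike (w : String) : Bool := !(pvStrIsupper w) && !(pvStrIslower w)

-- ===== PORT A =====
-- the while loop; indices i, j = i+1 are always in range while j ≤ lim = len-1;
-- words[x].replace(words[x], "") is exactly "" (every string contains itself), ported as set x "".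
def removeNameLoop (ws : List String) (i j lim : Nat) : List String :=
  if _h : j ≤ lim then
    removeNameLoop
      (if pvNamelike (ws.getD i "") && pvNamelike (ws.getD j "") then
        (ws.set i "").set j "" else ws)
      (i + 1) (j + 1) lim
  else ws
termination_by lim + 1 - j

def removeName (text : String) : String :=
  let words := PySem.Str.split₀ text
  let lim := words.length - 1
  PySem.Str.join " " (removeNameLoop words 0 1 lim)

-- ===== PORT B =====
def removeName_alt (text : String) : String :=
  let words := PySem.Str.split₀ text
  let n := words.length
  let mask := words.map pvNamelike
  PySem.Str.join " " ((List.range n).map fun k =>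
    if mask.getD k false &&
        ((decide (0 < k) && mask.getD (k - 1) false) ||
         (decide (k + 1 < n) && mask.getD (k + 1) false)) then ""
    else words.getD k "")

-- ===== PRECONDITION & SPEC =====
def Spec_removeName (text : String) (out : String) : Prop := out = removeName_alt text
instance (text : String) (out : String) : Decidable (Spec_removeName text out) := by unfold Spec_removeName; infer_instance

-- ===== CLAIM (what is proved, stated in full; the proofs are below) =====
def Claim_equal_removeName : Prop := ∀ (text : String), Dom_removeName text → Spec_removeName text (removeName text)

-- ===== LEMMAS AND PROOFS =====

-- word k is blanked after the pairs (0,1) … (i-1,i) have been processed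
def pvBlanked (orig : List String) (i k : Nat) : Bool :=
  pvNamelike (orig.getD k "") &&
  ((decide (1 ≤ k) && decide (k ≤ i) && pvNamelike (orig.getD (k - 1) "")) ||
   (decide (k < i) && pvNamelike (orig.getD (k + 1) "")))

theorem pvNamelike_empty : pvNamelike "" = true := by decide

theorem pvBlanked_iff (orig : List String) (i k : Nat) :
    pvBlanked orig i k = true ↔
      pvNamelike (orig.getD k "") = true ∧
        ((1 ≤ k ∧ k ≤ i ∧ pvNamelike (orig.getD (k - 1) "") = true) ∨
         (k < i ∧ pvNamelike (orig.getD (k + 1) "") = true)) := by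
  simp [pvBlanked, and_assoc]

theorem pvBlanked_namelike {orig : List String} {i k : Nat}
    (h : pvBlanked orig i k = true) : pvNamelike (orig.getD k "") = true :=
  ((pvBlanked_iff orig i k).mp h).1

-- the key invariant: the loop state is orig with exactly the pvBlanked positions blanked
theorem removeNameLoop_char (orig : List String) (lim : Nat) (hlim : lim + 1 = orig.length) :
    ∀ (d i : Nat) (ws : List String), d = lim - i → i ≤ lim →
      ws.length = orig.length →
      (∀ k, ws.getD k "" = if pvBlanked orig i k then "" else orig.getD k "") →
      (removeNameLoop ws i (i + 1) lim).length = orig.length ∧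
      ∀ k, (removeNameLoop ws i (i + 1) lim).getD k ""
            = if pvBlanked orig lim k then "" else orig.getD k "" := by
  intro d
  induction d with
  | zero =>
    intro i ws hd hi hlen hws
    have hieq : i = lim := by omega
    subst hieq
    rw [removeNameLoop, dif_neg (by omega)]
    exact ⟨hlen, hws⟩
  | succ d ih =>
    intro i ws hd hi hlen hws
    have hilt : i < lim := by omega
    have hm : ∀ k, pvNamelike (ws.getD k "") = pvNamelike (orig.getD k "") := by
      intro k
      rw [hws k]
      by_cases hb : pvBlanked orig i k = true
      · rw [if_pos hb, pvNamelike_empty, pvBlanked_namelike hb]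
      · rw [if_neg hb]
    rw [removeNameLoop, dif_pos (by omega : i + 1 ≤ lim)]
    apply ih (i + 1) _ (by omega) (by omega)
    · by_cases hc : (pvNamelike (ws.getD i "") && pvNamelike (ws.getD (i + 1) "")) = true
      · rw [if_pos hc]; simp [hlen]
      · rw [if_neg hc]; exact hlen
    · intro k
      have hmi : pvNamelike (ws.getD i "") = pvNamelike (orig.getD i "") := hm i
      have hmj : pvNamelike (ws.getD (i + 1) "") = pvNamelike (orig.getD (i + 1) "") := hm (i + 1)
      by_cases hc : (pvNamelike (ws.getD i "") && pvNamelike (ws.getD (i + 1) "")) = true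
      · -- both name-like: positions i and i+1 become ""
        rw [if_pos hc]
        rw [hmi, hmj, Bool.and_eq_true] at hc
        have hgd : ((ws.set i "").set (i + 1) "").getD k ""
            = if k = i ∨ k = i + 1 then "" else ws.getD k "" := by
          rw [List.getD_eq_getElem?_getD, List.getElem?_set, List.getElem?_set]
          by_cases h1 : k = i + 1
          · simp [h1, List.length_set, hlen, show i + 1 < orig.length by omega,
              ]
          · by_cases h2 : k = i
            · simp [h2, hlen, show i < orig.length by omega]
            · simp [show ¬ (i + 1 = k) by omega, show ¬ (i = k) by omega, h1, h2,
                List.getD_eq_getElem?_getD]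
        rw [hgd]
        by_cases h1 : k = i ∨ k = i + 1
        · rw [if_pos h1]
          have : pvBlanked orig (i + 1) k = true := by
            rw [pvBlanked_iff]
            rcases h1 with h1 | h1 <;> subst h1
            · exact ⟨hc.1, Or.inr ⟨by omega, hc.2⟩⟩
            · exact ⟨hc.2, Or.inl ⟨by omega, by omega, by simpa using hc.1⟩⟩
          rw [this]; rfl
        · rw [if_neg h1, hws k]
          have : pvBlanked orig (i + 1) k = pvBlanked orig i k := by
            rw [Bool.eq_iff_iff, pvBlanked_iff, pvBlanked_iff]
            constructor
            · rintro ⟨h0, ⟨a, b, c⟩ | ⟨a, b⟩⟩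
              · exact ⟨h0, Or.inl ⟨a, by omega, c⟩⟩
              · exact ⟨h0, Or.inr ⟨by omega, b⟩⟩
            · rintro ⟨h0, ⟨a, b, c⟩ | ⟨a, b⟩⟩
              · exact ⟨h0, Or.inl ⟨a, by omega, c⟩⟩
              · exact ⟨h0, Or.inr ⟨by omega, b⟩⟩
          rw [this]
      · -- not both name-like: nothing changes, and the new clauses cannot fire
        rw [if_neg hc, hws k]
        rw [hmi, hmj] at hc
        have hcc : ¬ (pvNamelike (orig.getD i "") = true ∧ pvNamelike (orig.getD (i + 1) "") = true) := by
          simpa [Bool.and_eq_true] using hc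
        have : pvBlanked orig (i + 1) k = pvBlanked orig i k := by
          rw [Bool.eq_iff_iff, pvBlanked_iff, pvBlanked_iff]
          constructor
          · rintro ⟨h0, ⟨a, b, c⟩ | ⟨a, b⟩⟩
            · by_cases hk : k = i + 1
              · subst hk; simp at b ⊢
                exact absurd ⟨by simpa using c, h0⟩ hcc
              · exact ⟨h0, Or.inl ⟨a, by omega, c⟩⟩
            · by_cases hk : k = i
              · subst hk; exact absurd ⟨h0, b⟩ hcc
              · exact ⟨h0, Or.inr ⟨by omega, b⟩⟩
          · rintro ⟨h0, ⟨a, b, c⟩ | ⟨a, b⟩⟩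
            · exact ⟨h0, Or.inl ⟨a, by omega, c⟩⟩
            · exact ⟨h0, Or.inr ⟨by omega, b⟩⟩
        rw [this]

theorem removeName_spec_aux (text : String) : removeName text = removeName_alt text := by
  unfold removeName removeName_alt
  cases hw : PySem.Str.split₀ text with
  | nil =>
    dsimp only
    rw [removeNameLoop, dif_neg (by simp)]
    simp
  | cons w ws =>
    set words : List String := w :: ws with hwords
    have hlen : words.length = ws.length + 1 := by simp [hwords]
    have hlim : (words.length - 1) + 1 = words.length := by omega
    have h0 : ∀ k, words.getD k "" = if pvBlanked words 0 k then "" else words.getD k "" := by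
      intro k
      have : pvBlanked words 0 k = false := by
        rw [Bool.eq_false_iff, Ne, pvBlanked_iff]
        rintro ⟨-, ⟨a, b, -⟩ | ⟨a, -⟩⟩ <;> omega
      rw [this]; rfl
    obtain ⟨hL, hK⟩ := removeNameLoop_char words (words.length - 1) hlim
      (words.length - 1) 0 words (by omega) (by omega) rfl h0
    dsimp only
    congr 1
    apply List.ext_getElem
    · simp [hL]
    · intro k h1 h2
      simp only [List.getElem_map, List.getElem_range]
      have hkn : k < words.length := by simpa [hL] using h1
      have hres : (removeNameLoop words 0 1 (words.length - 1))[k] =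
          if pvBlanked words (words.length - 1) k then "" else words.getD k "" := by
        have := hK k
        rwa [List.getD_eq_getElem?_getD, List.getElem?_eq_getElem h1, Option.getD_some] at this
      rw [hres]
      -- identify B's condition with pvBlanked
      have hmask : ∀ j, j < words.length →
          (words.map pvNamelike).getD j false = pvNamelike (words.getD j "") := by
        intro j hj
        rw [List.getD_eq_getElem?_getD, List.getElem?_map,
          List.getElem?_eq_getElem (by simpa using hj), List.getD_eq_getElem?_getD,
          List.getElem?_eq_getElem hj]
        rfl
      have hcond : ((words.map pvNamelike).getD k false &&
          ((decide (0 < k) && (words.map pvNamelike).getD (k - 1) false) ||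
           (decide (k + 1 < words.length) && (words.map pvNamelike).getD (k + 1) false)))
          = pvBlanked words (words.length - 1) k := by
        rw [Bool.eq_iff_iff, pvBlanked_iff]
        rw [hmask k hkn]
        simp only [Bool.and_eq_true, Bool.or_eq_true, decide_eq_true_iff]
        constructor
        · rintro ⟨h0, ⟨a, b⟩ | ⟨a, b⟩⟩
          · exact ⟨h0, Or.inl ⟨by omega, by omega, by rwa [hmask (k - 1) (by omega)] at b⟩⟩
          · exact ⟨h0, Or.inr ⟨by omega, by rwa [hmask (k + 1) (by omega)] at b⟩⟩
        · rintro ⟨h0, ⟨a, b, c⟩ | ⟨a, b⟩⟩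
          · exact ⟨h0, Or.inl ⟨by omega, by rwa [hmask (k - 1) (by omega)]⟩⟩
          · exact ⟨h0, Or.inr ⟨by omega, by rwa [hmask (k + 1) (by omega)]⟩⟩
      rw [hcond]

-- ===== VERDICT (by name: the statement is the Claim_ definition above) =====
theorem removeName_spec : Claim_equal_removeName := by
  intro text _
  exact removeName_spec_aux text
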